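-- pv_equiv track=rewrite | github.com/Achronus/Zentra | cli/templates/ui/attributes.py | alt_attribute
-- ===== SOURCE A (Python) =====
-- def alt_attribute(alt: str) -> str:
--     """Returns a string for the `alt` attribute based on its given value."""
--     values = alt.split(" ")
--     param_str = False
--
--     new_alt = []
--     for word in values:
--         if word and word.startswith("$"):
--             word = "{" + word[1:] + "}"
--             param_str = True
--         new_alt.append(word)
--
--     if param_str:
--         return "alt=" + "{`" + " ".join(new_alt) + "`}"
--
--     return f'alt="{" ".join(new_alt)}"'
-- ===== SOURCE B (Python) =====
-- def alt_attribute(alt: str) -> str: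
--     """Single-pass character state machine: no split/join, no intermediate token list."""
--     out = []
--     found = False
--     i, n = 0, len(alt)
--     at_start = True
--     while i < n:
--         c = alt[i]
--         if at_start and c == "$":
--             found = True
--             out.append("{")
--             i += 1
--             while i < n and alt[i] != " ":
--                 out.append(alt[i])
--                 i += 1
--             out.append("}")
--             at_start = False
--         else:
--             out.append(c)
--             at_start = c == " "
--             i += 1
--     body = "".join(out)
--     if found:
--         return "alt=" + "{`" + body + "`}"
--     return f'alt="{body}"'
-- ===== Notes on version B (the rewrite author's own statement) =====
-- stated objective: alternative
-- what changed: Replaced split-into-tokens / transform-loop / join pipeline with a single-pass character state machine that emits the output directly (no token list, no join); same wrapper choice via a found flag.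
import Mathlib
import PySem

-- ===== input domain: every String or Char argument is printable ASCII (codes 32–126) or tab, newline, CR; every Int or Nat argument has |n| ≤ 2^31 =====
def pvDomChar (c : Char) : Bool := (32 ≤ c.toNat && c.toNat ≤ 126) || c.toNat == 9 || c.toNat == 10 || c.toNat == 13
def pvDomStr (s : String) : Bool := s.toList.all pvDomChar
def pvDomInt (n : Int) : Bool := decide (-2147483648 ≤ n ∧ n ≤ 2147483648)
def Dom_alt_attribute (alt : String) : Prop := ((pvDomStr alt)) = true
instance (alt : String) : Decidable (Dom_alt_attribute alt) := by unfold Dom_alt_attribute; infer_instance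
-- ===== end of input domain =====

-- B replaces A's split/transform/join pipeline by a single-pass character state machine (alternative decomposition, same cost).

-- ===== PORT A =====
-- one step of A's for-loop: state = (new_alt so far, param_str flag)
def altA_step (st : List (List Char) × Bool) (word : List Char) : List (List Char) × Bool :=
  if (decide (word ≠ []) && PySem.Chars.startswith word ['$']) then
    (st.1 ++ [('{' :: PySem.Chars.slice word (some 1) none ++ ['}'])], true)
  else
    (st.1 ++ [word], st.2)

def alt_attribute (alt : String) : String :=
  let values := PySem.Chars.splitOn alt.toList [' ']
  let st := values.foldl altA_step ([], false)
  if st.2 then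
    String.ofList ("alt=".toList ++ "{`".toList ++ PySem.Chars.join [' '] st.1 ++ "`}".toList)
  else
    String.ofList ("alt=\"".toList ++ PySem.Chars.join [' '] st.1 ++ "\"".toList)

-- ===== PORT B =====
-- inner while loop of Source B: consume characters up to the next space
def altB_consume : List Char → (List Char × List Char)
  | [] => ([], [])
  | c :: r =>
    if c = ' ' then ([], c :: r)
    else
      let p := altB_consume r
      (c :: p.1, p.2)

theorem altB_consume_snd_len : ∀ (l : List Char), (altB_consume l).2.length ≤ l.length := by
  intro l
  induction l with
  | nil => simp [altB_consume]
  | cons c r ih =>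
    simp only [altB_consume]
    split
    · simp
    · simpa using Nat.le_succ_of_le ih

-- outer while loop of Source B: (remaining chars, at_start) → (emitted chars, found flag)
def altB_scan : List Char → Bool → (List Char × Bool)
  | [], _ => ([], false)
  | c :: r, atStart =>
    if atStart && (c == '$') then
      let p := altB_consume r
      let q := altB_scan p.2 false
      ('{' :: (p.1 ++ '}' :: q.1), true)
    else
      let q := altB_scan r (c == ' ')
      (c :: q.1, q.2)
termination_by l _ => l.length
decreasing_by
  · exact Nat.lt_succ_of_le (altB_consume_snd_len r)
  · simp

def alt_attribute_alt (alt : String) : String :=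
  let st := altB_scan alt.toList true
  if st.2 then
    String.ofList ("alt=".toList ++ "{`".toList ++ st.1 ++ "`}".toList)
  else
    String.ofList ("alt=\"".toList ++ st.1 ++ "\"".toList)

-- ===== PRECONDITION & SPEC =====
def Spec_alt_attribute (alt : String) (out : String) : Prop := out = alt_attribute_alt alt
instance (alt : String) (out : String) : Decidable (Spec_alt_attribute alt out) := by unfold Spec_alt_attribute; infer_instance

-- ===== CLAIM (what is proved, stated in full; the proofs are below) =====
def Claim_equal_alt_attribute : Prop := ∀ (alt : String), Dom_alt_attribute alt → Spec_alt_attribute alt (alt_attribute alt)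

-- ===== LEMMAS AND PROOFS =====

-- a simple structural split-on-single-space, used to mediate between the two ports
def split1 : List Char → List (List Char)
  | [] => [[]]
  | c :: r =>
    if c = ' ' then [] :: split1 r
    else
      match split1 r with
      | t :: ts => (c :: t) :: ts
      | [] => [[c]]

theorem split1_ne_nil (l : List Char) : split1 l ≠ [] := by
  cases l with
  | nil => simp [split1]
  | cons c r =>
    simp only [split1]
    split
    · simp
    · split <;> simp

-- prepend a prefix onto the first token
def consHead (p : List Char) : List (List Char) → List (List Char)
  | [] => [p]
  | t :: ts => (p ++ t) :: ts

theorem go_eq_split1 : ∀ (fuel : Nat) (l cur : List Char) (acc : List (List Char)),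
    l.length < fuel →
    PySem.Chars.splitOn.go [' '] fuel l cur acc = acc.reverse ++ consHead cur.reverse (split1 l) := by
  intro fuel
  induction fuel with
  | zero => intro l cur acc h; omega
  | succ f ih =>
    intro l cur acc h
    cases l with
    | nil =>
      simp [PySem.Chars.splitOn.go, split1, consHead]
    | cons c r =>
      by_cases hc : c = ' '
      · subst hc
        have hpre : [' '].isPrefixOf (' ' :: r) = true := by simp [List.isPrefixOf]
        rw [PySem.Chars.splitOn.go]
        simp only [hpre, if_pos, List.length_cons, List.length_nil, List.drop_succ_cons, List.drop_zero]
        rw [ih r [] (cur.reverse :: acc) (by simpa using Nat.lt_of_succ_lt_succ h)]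
        simp only [split1, if_pos]
        cases hs : split1 r with
        | nil => exact absurd hs (split1_ne_nil r)
        | cons t ts => simp [consHead]
      · have hpre : [' '].isPrefixOf (c :: r) = false := by
          simp only [List.isPrefixOf, Bool.and_eq_false_iff, beq_eq_false_iff_ne, ne_eq]
          exact Or.inl (fun h => hc h.symm)
        rw [PySem.Chars.splitOn.go]
        simp only [hpre, Bool.false_eq_true, if_false]
        rw [ih r (c :: cur) acc (by simpa using Nat.lt_of_succ_lt_succ h)]
        simp only [split1, if_neg hc]
        cases hs : split1 r with
        | nil => exact absurd hs (split1_ne_nil r)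
        | cons t ts => simp [consHead]

theorem splitOn_eq_split1 (l : List Char) : PySem.Chars.splitOn l [' '] = split1 l := by
  have h := go_eq_split1 (l.length + 1) l [] [] (by omega)
  rw [PySem.Chars.splitOn, h]
  cases hs : split1 l with
  | nil => exact absurd hs (split1_ne_nil l)
  | cons t ts => simp [consHead]

-- token-level view of A's transform
def isParam (w : List Char) : Bool := decide (w ≠ []) && PySem.Chars.startswith w ['$']

def trTok (w : List Char) : List Char :=
  if isParam w then '{' :: PySem.Chars.slice w (some 1) none ++ ['}'] else w

theorem foldl_altA_step (ts : List (List Char)) :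
    ∀ (acc : List (List Char)) (b : Bool),
    ts.foldl altA_step (acc, b) = (acc ++ ts.map trTok, b || ts.any isParam) := by
  induction ts with
  | nil => intro acc b; simp
  | cons t ts ih =>
    intro acc b
    simp only [List.foldl_cons, List.map_cons, List.any_cons]
    by_cases hp : isParam t = true
    · have : altA_step (acc, b) t
          = (acc ++ [('{' :: PySem.Chars.slice t (some 1) none ++ ['}'])], true) := by
        simp only [altA_step]
        rw [if_pos (by simpa [isParam] using hp)]
      rw [this, ih]
      simp [trTok, hp]
    · have hb : (decide (t ≠ []) && PySem.Chars.startswith t ['$']) = false := by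
        simpa [isParam] using hp
      have : altA_step (acc, b) t = (acc ++ [t], b) := by
        simp only [altA_step]
        rw [if_neg (by rw [hb]; exact Bool.false_ne_true)]
      have hp' : isParam t = false := by simpa using hp
      rw [this, ih]
      simp [trTok, hp']

theorem consume_split1 : ∀ (r : List Char),
    (split1 r = [(altB_consume r).1] ∧ (altB_consume r).2 = []) ∨
    (∃ r', (altB_consume r).2 = ' ' :: r' ∧ split1 r = (altB_consume r).1 :: split1 r') := by
  intro r
  induction r with
  | nil => left; simp [split1, altB_consume]
  | cons c r ih =>
    by_cases hc : c = ' '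
    · subst hc
      right
      exact ⟨r, by simp [altB_consume], by simp [altB_consume, split1]⟩
    · rcases ih with ⟨h1, h2⟩ | ⟨r', h1, h2⟩
      · left
        constructor
        · simp only [split1, if_neg hc, h1]
          simp [altB_consume, hc]
        · simp [altB_consume, hc, h2]
      · right
        refine ⟨r', by simp [altB_consume, hc, h1], ?_⟩
        simp only [split1, if_neg hc, h2]
        simp [altB_consume, hc]

-- join with a single-space separator
theorem join_cons (t : List Char) (ts : List (List Char)) (h : ts ≠ []) :
    PySem.Chars.join [' '] (t :: ts) = t ++ ' ' :: PySem.Chars.join [' '] ts := by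
  cases ts with
  | nil => exact absurd rfl h
  | cons u us => simp [PySem.Chars.join, List.intercalate]

theorem join_singleton' (t : List Char) : PySem.Chars.join [' '] [t] = t := by
  simp [PySem.Chars.join, List.intercalate]

theorem trTok_param (c : Char) (t : List Char) (hc : c = '$') :
    trTok (c :: t) = '{' :: t ++ ['}'] := by
  subst hc
  simp [trTok, isParam, PySem.Chars.startswith, List.isPrefixOf, PySem.List.slice_from_one]

theorem trTok_nonparam (w : List Char) (h : isParam w = false) : trTok w = w := by
  simp [trTok, h]

theorem isParam_nonspace (c : Char) (t : List Char) (hc : c ≠ '$') : isParam (c :: t) = false := by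
  simp only [isParam, PySem.Chars.startswith, List.isPrefixOf, Bool.and_eq_false_iff,
    beq_eq_false_iff_ne, ne_eq]
  exact Or.inr (Or.inl (fun h => hc h.symm))

-- the central invariant: B's scan computes A's token pipeline
def scanP (cs : List Char) : Prop :=
  altB_scan cs true = (PySem.Chars.join [' '] ((split1 cs).map trTok), (split1 cs).any isParam)

def scanQ (cs : List Char) : Prop :=
  altB_scan cs false
    = (PySem.Chars.join [' '] ((split1 cs).headI :: ((split1 cs).tail).map trTok),
       ((split1 cs).tail).any isParam)

theorem join_prepend (c : Char) (t0 : List Char) (ts : List (List Char)) :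
    PySem.Chars.join [' '] ((c :: t0) :: ts) = c :: PySem.Chars.join [' '] (t0 :: ts) := by
  cases ts <;> simp [PySem.Chars.join, List.intercalate]

theorem join_cons_ne (t : List Char) (ts : List (List Char)) (h : ts ≠ []) :
    PySem.Chars.join [' '] (t :: ts) = t ++ ' ' :: PySem.Chars.join [' '] ts := join_cons t ts h

theorem map_trTok_ne_nil (ts : List (List Char)) (h : ts ≠ []) : ts.map trTok ≠ [] := by
  cases ts with
  | nil => exact absurd rfl h
  | cons a as => simp

theorem scan_spec : ∀ (n : Nat) (cs : List Char), cs.length ≤ n → scanP cs ∧ scanQ cs := by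
  intro n
  induction n with
  | zero =>
    intro cs hlen
    have : cs = [] := by
      cases cs with
      | nil => rfl
      | cons c r => simp at hlen
    subst this
    constructor <;> simp [scanP, scanQ, altB_scan, split1, trTok, isParam]
  | succ n ih =>
    intro cs hlen
    cases cs with
    | nil => constructor <;> simp [scanP, scanQ, altB_scan, split1, trTok, isParam]
    | cons c r =>
      have hr : r.length ≤ n := by simpa using Nat.le_of_succ_le_succ hlen
      cases hs : split1 r with
      | nil => exact absurd hs (split1_ne_nil r)
      | cons t0 ts =>
      have ihP : altB_scan r true
          = (PySem.Chars.join [' '] ((t0 :: ts).map trTok), (t0 :: ts).any isParam) := by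
        have := (ih r hr).1
        rwa [scanP, hs] at this
      have ihQ : altB_scan r false
          = (PySem.Chars.join [' '] (t0 :: ts.map trTok), ts.any isParam) := by
        have := (ih r hr).2
        rwa [scanQ, hs] at this
      by_cases hsp : c = ' '
      · -- a space: new empty token on the A side, emitted verbatim on the B side
        subst hsp
        have hsplit : split1 (' ' :: r) = [] :: t0 :: ts := by simp [split1, hs]
        have hmap : List.map trTok ([] :: t0 :: ts) = [] :: List.map trTok (t0 :: ts) := by
          simp [trTok, isParam]
        constructor
        · rw [scanP, hsplit, altB_scan]
          simp only [show ((' ' == '$') = false) from rfl, Bool.and_false, Bool.false_eq_true,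
            if_false, show ((' ' == ' ') = true) from rfl, ihP]
          rw [hmap, join_cons_ne [] _ (by simp)]
          simp [isParam]
        · rw [scanQ, hsplit, altB_scan]
          simp only [Bool.false_and, Bool.false_eq_true, if_false,
            show ((' ' == ' ') = true) from rfl, ihP]
          rw [List.headI, List.tail_cons, join_cons_ne [] _ (by simp)]
          simp
      · by_cases hd : c = '$'
        · -- a '$' token start on the B side ↔ a param token on the A side
          subst hd
          constructor
          · rw [scanP, altB_scan]
            simp only [show (('$' == '$') = true) from rfl, Bool.and_true, if_pos]
            rcases consume_split1 r with ⟨h1, h2⟩ | ⟨r', h1, h2⟩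
            · have hsplit : split1 ('$' :: r) = [('$' :: (altB_consume r).1)] := by
                simp [split1, h1]
              rw [hsplit, h2]
              simp only [altB_scan, List.map_cons, List.map_nil]
              rw [join_singleton', trTok_param _ _ rfl]
              simp [isParam, PySem.Chars.startswith, List.isPrefixOf]
            · have hlen' : r'.length + 1 ≤ n := by
                have := altB_consume_snd_len r
                rw [h1] at this
                simp only [List.length_cons] at this
                omega
              have hq : altB_scan (' ' :: r') false
                  = (PySem.Chars.join [' '] ([] :: (split1 r').map trTok),
                     (split1 r').any isParam) := by
                have := (ih (' ' :: r') (by simpa using hlen')).2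
                rw [scanQ] at this
                have hsp' : split1 (' ' :: r') = [] :: split1 r' := by simp [split1]
                rw [hsp'] at this
                simpa using this
              have hsplit : split1 ('$' :: r) = ('$' :: (altB_consume r).1) :: split1 r' := by
                simp [split1, h2]
              rw [hsplit, h1, hq]
              rw [List.map_cons, trTok_param _ _ rfl,
                join_cons_ne _ _ (map_trTok_ne_nil _ (split1_ne_nil r')),
                join_cons_ne _ _ (map_trTok_ne_nil _ (split1_ne_nil r'))]
              simp [isParam, PySem.Chars.startswith, List.isPrefixOf]
          · rw [scanQ, altB_scan]
            have hsplit : split1 ('$' :: r) = ('$' :: t0) :: ts := by simp [split1, hs]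
            simp only [Bool.false_and, Bool.false_eq_true, if_false,
              show (('$' == ' ') = false) from rfl, ihQ, hsplit]
            rw [List.headI, List.tail_cons, join_prepend]
        · -- an ordinary character: extends the current token on both sides
          have hce : (c == ' ') = false := by simp [hsp]
          have hcd : (c == '$') = false := by simp [hd]
          have hsplit : split1 (c :: r) = (c :: t0) :: ts := by simp [split1, hsp, hs]
          constructor
          · rw [scanP, altB_scan]
            simp only [hcd, Bool.and_false, Bool.false_eq_true, if_false, hce, ihQ, hsplit]
            rw [List.map_cons, trTok_nonparam _ (isParam_nonspace c t0 hd), join_prepend]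
            simp [isParam_nonspace c t0 hd]
          · rw [scanQ, altB_scan]
            simp only [Bool.false_and, Bool.false_eq_true, if_false, hce, ihQ, hsplit]
            rw [List.headI, List.tail_cons, join_prepend]

-- ===== VERDICT (by name: the statement is the Claim_ definition above) =====
theorem alt_attribute_spec : Claim_equal_alt_attribute := by
  unfold Claim_equal_alt_attribute
  intro alt _
  unfold Spec_alt_attribute alt_attribute alt_attribute_alt
  rw [splitOn_eq_split1]
  cases hs : split1 alt.toList with
  | nil => exact absurd hs (split1_ne_nil _)
  | cons t0 ts =>
    have hP := (scan_spec alt.toList.length alt.toList le_rfl).1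
    rw [scanP, hs] at hP
    simp only [hP, foldl_altA_step, List.nil_append, Bool.false_or]
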